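-- pv_equiv track=rewrite | github.com/ShunsukeY/Paperbot | MultiKeywords_test_v1.py | guess_article_type
-- ===== SOURCE A (Python) =====
-- def guess_article_type(paper):
--     """
--     PubMed の PublicationTypeList や Crossref type から、ざっくり種別ラベルを決める。
--     戻り値の例: "Review", "Meta-analysis", "Clinical trial", "Case report", "Editorial", ...
--     """
--     pub_types = paper.get("pub_types") or []
--     pts_lower = [pt.lower() for pt in pub_types]
--
--     if any("meta-analysis" in pt for pt in pts_lower):
--         return "Meta-analysis"
--     if any("systematic review" in pt for pt in pts_lower):
--         return "Systematic review"
--     if any("review" in pt for pt in pts_lower):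
--         return "Review"
--     if any("randomized controlled trial" in pt for pt in pts_lower):
--         return "Randomized controlled trial"
--     if any("clinical trial" in pt for pt in pts_lower):
--         return "Clinical trial"
--     if any("case reports" in pt for pt in pts_lower) or any("case report" in pt for pt in pts_lower):
--         return "Case report"
--     if any("editorial" in pt for pt in pts_lower):
--         return "Editorial"
--     if any("letter" in pt for pt in pts_lower):
--         return "Letter"
--     if any("comment" in pt for pt in pts_lower):
--         return "Comment"
--
--     if pub_types:
--         return pub_types[0]
--
--     return "(unknown)"
-- ===== SOURCE B (Python) =====
-- _KEYWORDS = [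
--     ("meta-analysis", "Meta-analysis"),
--     ("systematic review", "Systematic review"),
--     ("review", "Review"),
--     ("randomized controlled trial", "Randomized controlled trial"),
--     ("clinical trial", "Clinical trial"),
--     ("case report", "Case report"),
--     ("editorial", "Editorial"),
--     ("letter", "Letter"),
--     ("comment", "Comment"),
-- ]
--
--
-- def guess_article_type(paper):
--     pub_types = paper.get("pub_types") or []
--     best = None  # (rank, label) with the lowest rank seen so far
--     for pt in pub_types:
--         low = pt.lower()
--         for rank, (kw, label) in enumerate(_KEYWORDS):
--             if kw in low:
--                 if best is None or rank < best[0]: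
--                     best = (rank, label)
--                 break
--     if best is not None:
--         return best[1]
--     return pub_types[0] if pub_types else "(unknown)"
-- ===== Notes on version B (the rewrite author's own statement) =====
-- stated objective: idiomatic
-- what changed: Replaces the nine-branch keyword-first if-chain (each branch rescanning the whole list) with a single pass over pub_types that keeps the lowest-ranked match from a priority-ordered keyword table; a single 'case report' keyword subsumes the original 'case reports' OR.
import Mathlib
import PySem

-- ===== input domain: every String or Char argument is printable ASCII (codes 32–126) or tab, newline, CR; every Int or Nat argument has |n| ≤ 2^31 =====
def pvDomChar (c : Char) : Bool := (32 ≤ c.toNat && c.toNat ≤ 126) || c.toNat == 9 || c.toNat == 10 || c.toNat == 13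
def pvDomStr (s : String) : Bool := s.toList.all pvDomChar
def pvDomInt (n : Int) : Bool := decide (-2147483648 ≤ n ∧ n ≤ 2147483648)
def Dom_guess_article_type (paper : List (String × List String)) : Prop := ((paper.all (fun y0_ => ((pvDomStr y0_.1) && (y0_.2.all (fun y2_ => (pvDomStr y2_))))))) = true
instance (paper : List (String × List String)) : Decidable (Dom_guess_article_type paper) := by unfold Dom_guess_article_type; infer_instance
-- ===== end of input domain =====

-- B replaces A's keyword-first if-chain with one pass over pub_types keeping the lowest-ranked keyword match (idiomatic restructuring, same cost).


-- ===== PORT A =====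
def guess_article_type (paper : List (String × List String)) : String :=
  let pub_types := ((PySem.Dict.mk paper).get? "pub_types").getD []
  let pts_lower := pub_types.map PySem.Str.lower
  if pts_lower.any (fun pt => PySem.Str.isIn "meta-analysis" pt) then "Meta-analysis"
  else if pts_lower.any (fun pt => PySem.Str.isIn "systematic review" pt) then "Systematic review"
  else if pts_lower.any (fun pt => PySem.Str.isIn "review" pt) then "Review"
  else if pts_lower.any (fun pt => PySem.Str.isIn "randomized controlled trial" pt) then "Randomized controlled trial"
  else if pts_lower.any (fun pt => PySem.Str.isIn "clinical trial" pt) then "Clinical trial"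
  else if pts_lower.any (fun pt => PySem.Str.isIn "case reports" pt) || pts_lower.any (fun pt => PySem.Str.isIn "case report" pt) then "Case report"
  else if pts_lower.any (fun pt => PySem.Str.isIn "editorial" pt) then "Editorial"
  else if pts_lower.any (fun pt => PySem.Str.isIn "letter" pt) then "Letter"
  else if pts_lower.any (fun pt => PySem.Str.isIn "comment" pt) then "Comment"
  else match pub_types with
  | p :: _ => p
  | [] => "(unknown)"

-- ===== PORT B =====
def altKeywords : List (String × String) :=
  [("meta-analysis", "Meta-analysis"),
   ("systematic review", "Systematic review"),
   ("review", "Review"),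
   ("randomized controlled trial", "Randomized controlled trial"),
   ("clinical trial", "Clinical trial"),
   ("case report", "Case report"),
   ("editorial", "Editorial"),
   ("letter", "Letter"),
   ("comment", "Comment")]

-- inner 'for rank, (kw, label) in enumerate(_KEYWORDS): if kw in low: … break'
def altFirstMatch : List (String × String) → Nat → String → Option (Nat × String)
  | [], _, _ => none
  | (kw, label) :: rest, rank, low =>
      if PySem.Str.isIn kw low then some (rank, label) else altFirstMatch rest (rank + 1) low

-- loop body: keep the lowest-ranked match seen so far
def altStep (best : Option (Nat × String)) (pt : String) : Option (Nat × String) :=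
  match altFirstMatch altKeywords 0 (PySem.Str.lower pt) with
  | none => best
  | some (rank, label) =>
      match best with
      | none => some (rank, label)
      | some (br, _) => if rank < br then some (rank, label) else best

def guess_article_type_alt (paper : List (String × List String)) : String :=
  let pub_types := ((PySem.Dict.mk paper).get? "pub_types").getD []
  let best := pub_types.foldl altStep none
  match best with
  | some (_, label) => label
  | none =>
      match pub_types with
      | p :: _ => p
      | [] => "(unknown)"

-- ===== PRECONDITION & SPEC =====
def Spec_guess_article_type (paper : List (String × List String)) (out : String) : Prop := out = guess_article_type_alt paper
instance (paper : List (String × List String)) (out : String) : Decidable (Spec_guess_article_type paper out) := by unfold Spec_guess_article_type; infer_instance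

-- ===== CLAIM (what is proved, stated in full; the proofs are below) =====
def Claim_equal_guess_article_type : Prop := ∀ (paper : List (String × List String)), Dom_guess_article_type paper → Spec_guess_article_type paper (guess_article_type paper)

-- ===== LEMMAS AND PROOFS =====

-- priority rank of a lowercased pub_type: index of the first table keyword it contains, 9 if none
def rk (low : String) : Nat :=
  if PySem.Str.isIn "meta-analysis" low then 0
  else if PySem.Str.isIn "systematic review" low then 1
  else if PySem.Str.isIn "review" low then 2
  else if PySem.Str.isIn "randomized controlled trial" low then 3
  else if PySem.Str.isIn "clinical trial" low then 4
  else if PySem.Str.isIn "case report" low then 5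
  else if PySem.Str.isIn "editorial" low then 6
  else if PySem.Str.isIn "letter" low then 7
  else if PySem.Str.isIn "comment" low then 8
  else 9

def kwAt : Nat → String
  | 0 => "meta-analysis"
  | 1 => "systematic review"
  | 2 => "review"
  | 3 => "randomized controlled trial"
  | 4 => "clinical trial"
  | 5 => "case report"
  | 6 => "editorial"
  | 7 => "letter"
  | 8 => "comment"
  | _ => ""

def lblAt : Nat → String
  | 0 => "Meta-analysis"
  | 1 => "Systematic review"
  | 2 => "Review"
  | 3 => "Randomized controlled trial"
  | 4 => "Clinical trial"
  | 5 => "Case report"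
  | 6 => "Editorial"
  | 7 => "Letter"
  | 8 => "Comment"
  | _ => ""

lemma rk_le (low : String) : rk low ≤ 9 := by
  unfold rk; split_ifs <;> omega

lemma altFirstMatch_eq (low : String) :
    altFirstMatch altKeywords 0 low = if rk low = 9 then none else some (rk low, lblAt (rk low)) := by
  unfold rk
  simp only [altKeywords, altFirstMatch]
  split_ifs <;> simp_all [lblAt]

lemma rk_le_of_isIn (low : String) (j : Nat) (hj : j < 9)
    (h : PySem.Str.isIn (kwAt j) low = true) : rk low ≤ j := by
  interval_cases j <;> (unfold kwAt at h; unfold rk; split_ifs <;> simp_all)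

lemma isIn_of_rk_eq (low : String) (j : Nat) (hj : j < 9) (h : rk low = j) :
    PySem.Str.isIn (kwAt j) low = true := by
  unfold rk at h
  split_ifs at h <;> subst h <;> simp_all [kwAt]

lemma caseReports_imp (low : String)
    (h : PySem.Str.isIn "case reports" low = true) : PySem.Str.isIn "case report" low = true := by
  rw [PySem.Str.isIn_iff_infix] at h ⊢
  exact List.IsInfix.trans (by decide) h

-- fold of B encoded by the running minimum rank
def encB (m : Nat) : Option (Nat × String) := if m = 9 then none else some (m, lblAt m)

lemma altStep_enc (m : Nat) (hm : m ≤ 9) (pt : String) :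
    altStep (encB m) pt = encB (min m (rk (PySem.Str.lower pt))) := by
  unfold altStep
  rw [altFirstMatch_eq]
  have hr := rk_le (PySem.Str.lower pt)
  set r := rk (PySem.Str.lower pt) with hrdef
  by_cases h9 : r = 9
  · simp only [h9, reduceIte, Nat.min_eq_left hm]
  · by_cases hm9 : m = 9
    · simp [hm9, encB, show min 9 r = r by omega, h9]
    · by_cases hlt : r < m
      · simp [encB, hm9, hlt, show min m r = r by omega, h9]
      · simp [h9, encB, hlt, show min m r = m by omega, hm9]

lemma foldB_enc (xs : List String) (m : Nat) (hm : m ≤ 9) :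
    xs.foldl altStep (encB m) = encB (xs.foldl (fun a pt => min a (rk (PySem.Str.lower pt))) m) := by
  induction xs generalizing m with
  | nil => rfl
  | cons x xs ih =>
      simp only [List.foldl_cons]
      rw [altStep_enc m hm x]
      exact ih _ (by have := rk_le (PySem.Str.lower x); omega)

lemma foldMin_le_init (xs : List String) (m : Nat) :
    xs.foldl (fun a pt => min a (rk (PySem.Str.lower pt))) m ≤ m := by
  induction xs generalizing m with
  | nil => simp
  | cons x xs ih =>
      simp only [List.foldl_cons]
      refine le_trans (ih _) ?_
      simp

lemma foldMin_le_mem (xs : List String) :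
    ∀ (m : Nat) (pt : String), pt ∈ xs →
      xs.foldl (fun a pt => min a (rk (PySem.Str.lower pt))) m ≤ rk (PySem.Str.lower pt) := by
  induction xs with
  | nil => intro m pt h; cases h
  | cons x xs ih =>
      intro m pt h
      rw [List.mem_cons] at h
      simp only [List.foldl_cons]
      rcases h with h | h
      · subst h
        refine le_trans (foldMin_le_init xs _) ?_
        simp
      · exact ih _ pt h

lemma foldMin_cases (xs : List String) (m : Nat) :
    xs.foldl (fun a pt => min a (rk (PySem.Str.lower pt))) m = m ∨
    ∃ pt ∈ xs, xs.foldl (fun a pt => min a (rk (PySem.Str.lower pt))) m = rk (PySem.Str.lower pt) := by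
  induction xs generalizing m with
  | nil => left; rfl
  | cons x xs ih =>
      simp only [List.foldl_cons]
      rcases ih (min m (rk (PySem.Str.lower x))) with h | ⟨pt, hmem, heq⟩
      · by_cases hx : rk (PySem.Str.lower x) < m
        · right; exact ⟨x, List.mem_cons_self .., by rw [h]; omega⟩
        · left; rw [h]; omega
      · right; exact ⟨pt, List.mem_cons_of_mem _ hmem, heq⟩

lemma anyC_false (xs : List String) (k : Nat) (j : Nat) (hj : j < 9) (hjk : j < k)
    (hmin : ∀ pt ∈ xs, k ≤ rk (PySem.Str.lower pt)) :
    (xs.map PySem.Str.lower).any (fun pt => PySem.Str.isIn (kwAt j) pt) = false := by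
  simp only [List.any_eq_false, List.mem_map]
  rintro low ⟨pt, hpt, rfl⟩ hIs
  have := rk_le_of_isIn _ j hj hIs
  have := hmin pt hpt
  omega

-- ===== VERDICT (by name: the statement is the Claim_ definition above) =====
theorem guess_article_type_spec : Claim_equal_guess_article_type := by
  intro paper _
  unfold Spec_guess_article_type guess_article_type guess_article_type_alt
  generalize ((PySem.Dict.mk paper).get? "pub_types").getD [] = pts
  simp only []
  have hfold : pts.foldl altStep none = encB (pts.foldl (fun a pt => min a (rk (PySem.Str.lower pt))) 9) :=
    foldB_enc pts 9 (le_refl 9)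
  obtain ⟨M, hM⟩ : ∃ M, pts.foldl (fun a pt => min a (rk (PySem.Str.lower pt))) 9 = M := ⟨_, rfl⟩
  rw [hM] at hfold
  rw [hfold]
  have hMle : M ≤ 9 := hM ▸ foldMin_le_init pts 9
  have hmem : ∀ pt ∈ pts, M ≤ rk (PySem.Str.lower pt) := fun pt h => hM ▸ foldMin_le_mem pts 9 pt h
  have hS : 6 ≤ M → (pts.map PySem.Str.lower).any (fun pt => PySem.Str.isIn "case reports" pt) = false := by
    intro h6
    simp only [List.any_eq_false, List.mem_map]
    rintro low ⟨pt, hpt, rfl⟩ hIs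
    have h5 : rk (PySem.Str.lower pt) ≤ 5 := rk_le_of_isIn _ 5 (by omega) (caseReports_imp _ hIs)
    have := hmem pt hpt
    omega
  by_cases h9 : M = 9
  · subst h9
    have hF : ∀ j < 9, (pts.map PySem.Str.lower).any (fun pt => PySem.Str.isIn (kwAt j) pt) = false :=
      fun j hj => anyC_false pts 9 j hj hj hmem
    have h0 : (pts.map PySem.Str.lower).any (fun pt => PySem.Str.isIn "meta-analysis" pt) = false := hF 0 (by omega)
    have h1 : (pts.map PySem.Str.lower).any (fun pt => PySem.Str.isIn "systematic review" pt) = false := hF 1 (by omega)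
    have h2 : (pts.map PySem.Str.lower).any (fun pt => PySem.Str.isIn "review" pt) = false := hF 2 (by omega)
    have h3 : (pts.map PySem.Str.lower).any (fun pt => PySem.Str.isIn "randomized controlled trial" pt) = false := hF 3 (by omega)
    have h4 : (pts.map PySem.Str.lower).any (fun pt => PySem.Str.isIn "clinical trial" pt) = false := hF 4 (by omega)
    have h5 : (pts.map PySem.Str.lower).any (fun pt => PySem.Str.isIn "case report" pt) = false := hF 5 (by omega)
    have h6 : (pts.map PySem.Str.lower).any (fun pt => PySem.Str.isIn "editorial" pt) = false := hF 6 (by omega)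
    have h7 : (pts.map PySem.Str.lower).any (fun pt => PySem.Str.isIn "letter" pt) = false := hF 7 (by omega)
    have h8 : (pts.map PySem.Str.lower).any (fun pt => PySem.Str.isIn "comment" pt) = false := hF 8 (by omega)
    have hSr := hS (by omega)
    simp only [h0, h1, h2, h3, h4, h5, h6, h7, h8, hSr, Bool.false_eq_true, Bool.or_self, if_false]
    rfl
  · have hlt : M < 9 := lt_of_le_of_ne hMle h9
    rcases foldMin_cases pts 9 with hc | ⟨pt0, hpt0, heq⟩
    · rw [hM] at hc; omega
    · rw [hM] at heq
      have hwit : PySem.Str.isIn (kwAt M) (PySem.Str.lower pt0) = true := isIn_of_rk_eq _ M hlt heq.symm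
      have hT : (pts.map PySem.Str.lower).any (fun pt => PySem.Str.isIn (kwAt M) pt) = true :=
        List.any_eq_true.mpr ⟨PySem.Str.lower pt0, List.mem_map_of_mem hpt0, hwit⟩
      have hF : ∀ j < M, (pts.map PySem.Str.lower).any (fun pt => PySem.Str.isIn (kwAt j) pt) = false :=
        fun j hj => anyC_false pts M j (by omega) hj hmem
      interval_cases M
      · -- M = 0
        have hk : (pts.map PySem.Str.lower).any (fun pt => PySem.Str.isIn "meta-analysis" pt) = true := hT
        simp only [hk, Bool.false_eq_true, Bool.or_true, Bool.true_or, Bool.false_or, Bool.or_self, if_false, if_true]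
        rfl
      · -- M = 1
        have h0 : (pts.map PySem.Str.lower).any (fun pt => PySem.Str.isIn "meta-analysis" pt) = false := hF 0 (by omega)
        have hk : (pts.map PySem.Str.lower).any (fun pt => PySem.Str.isIn "systematic review" pt) = true := hT
        simp only [h0, hk, Bool.false_eq_true, Bool.or_true, Bool.true_or, Bool.false_or, Bool.or_self, if_false, if_true]
        rfl
      · -- M = 2
        have h0 : (pts.map PySem.Str.lower).any (fun pt => PySem.Str.isIn "meta-analysis" pt) = false := hF 0 (by omega)
        have h1 : (pts.map PySem.Str.lower).any (fun pt => PySem.Str.isIn "systematic review" pt) = false := hF 1 (by omega)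
        have hk : (pts.map PySem.Str.lower).any (fun pt => PySem.Str.isIn "review" pt) = true := hT
        simp only [h0, h1, hk, Bool.false_eq_true, Bool.or_true, Bool.true_or, Bool.false_or, Bool.or_self, if_false, if_true]
        rfl
      · -- M = 3
        have h0 : (pts.map PySem.Str.lower).any (fun pt => PySem.Str.isIn "meta-analysis" pt) = false := hF 0 (by omega)
        have h1 : (pts.map PySem.Str.lower).any (fun pt => PySem.Str.isIn "systematic review" pt) = false := hF 1 (by omega)
        have h2 : (pts.map PySem.Str.lower).any (fun pt => PySem.Str.isIn "review" pt) = false := hF 2 (by omega)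
        have hk : (pts.map PySem.Str.lower).any (fun pt => PySem.Str.isIn "randomized controlled trial" pt) = true := hT
        simp only [h0, h1, h2, hk, Bool.false_eq_true, Bool.or_true, Bool.true_or, Bool.false_or, Bool.or_self, if_false, if_true]
        rfl
      · -- M = 4
        have h0 : (pts.map PySem.Str.lower).any (fun pt => PySem.Str.isIn "meta-analysis" pt) = false := hF 0 (by omega)
        have h1 : (pts.map PySem.Str.lower).any (fun pt => PySem.Str.isIn "systematic review" pt) = false := hF 1 (by omega)
        have h2 : (pts.map PySem.Str.lower).any (fun pt => PySem.Str.isIn "review" pt) = false := hF 2 (by omega)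
        have h3 : (pts.map PySem.Str.lower).any (fun pt => PySem.Str.isIn "randomized controlled trial" pt) = false := hF 3 (by omega)
        have hk : (pts.map PySem.Str.lower).any (fun pt => PySem.Str.isIn "clinical trial" pt) = true := hT
        simp only [h0, h1, h2, h3, hk, Bool.false_eq_true, Bool.or_true, Bool.true_or, Bool.false_or, Bool.or_self, if_false, if_true]
        rfl
      · -- M = 5
        have h0 : (pts.map PySem.Str.lower).any (fun pt => PySem.Str.isIn "meta-analysis" pt) = false := hF 0 (by omega)
        have h1 : (pts.map PySem.Str.lower).any (fun pt => PySem.Str.isIn "systematic review" pt) = false := hF 1 (by omega)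
        have h2 : (pts.map PySem.Str.lower).any (fun pt => PySem.Str.isIn "review" pt) = false := hF 2 (by omega)
        have h3 : (pts.map PySem.Str.lower).any (fun pt => PySem.Str.isIn "randomized controlled trial" pt) = false := hF 3 (by omega)
        have h4 : (pts.map PySem.Str.lower).any (fun pt => PySem.Str.isIn "clinical trial" pt) = false := hF 4 (by omega)
        have hk : (pts.map PySem.Str.lower).any (fun pt => PySem.Str.isIn "case report" pt) = true := hT
        simp only [h0, h1, h2, h3, h4, hk, Bool.false_eq_true, Bool.or_true, Bool.true_or, Bool.false_or, Bool.or_self, if_false, if_true]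
        rfl
      · -- M = 6
        have h0 : (pts.map PySem.Str.lower).any (fun pt => PySem.Str.isIn "meta-analysis" pt) = false := hF 0 (by omega)
        have h1 : (pts.map PySem.Str.lower).any (fun pt => PySem.Str.isIn "systematic review" pt) = false := hF 1 (by omega)
        have h2 : (pts.map PySem.Str.lower).any (fun pt => PySem.Str.isIn "review" pt) = false := hF 2 (by omega)
        have h3 : (pts.map PySem.Str.lower).any (fun pt => PySem.Str.isIn "randomized controlled trial" pt) = false := hF 3 (by omega)
        have h4 : (pts.map PySem.Str.lower).any (fun pt => PySem.Str.isIn "clinical trial" pt) = false := hF 4 (by omega)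
        have h5 : (pts.map PySem.Str.lower).any (fun pt => PySem.Str.isIn "case report" pt) = false := hF 5 (by omega)
        have hk : (pts.map PySem.Str.lower).any (fun pt => PySem.Str.isIn "editorial" pt) = true := hT
        have hSr := hS (by omega)
        simp only [h0, h1, h2, h3, h4, h5, hk, hSr, Bool.false_eq_true, Bool.or_true, Bool.true_or, Bool.false_or, Bool.or_self, if_false, if_true]
        rfl
      · -- M = 7
        have h0 : (pts.map PySem.Str.lower).any (fun pt => PySem.Str.isIn "meta-analysis" pt) = false := hF 0 (by omega)
        have h1 : (pts.map PySem.Str.lower).any (fun pt => PySem.Str.isIn "systematic review" pt) = false := hF 1 (by omega)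
        have h2 : (pts.map PySem.Str.lower).any (fun pt => PySem.Str.isIn "review" pt) = false := hF 2 (by omega)
        have h3 : (pts.map PySem.Str.lower).any (fun pt => PySem.Str.isIn "randomized controlled trial" pt) = false := hF 3 (by omega)
        have h4 : (pts.map PySem.Str.lower).any (fun pt => PySem.Str.isIn "clinical trial" pt) = false := hF 4 (by omega)
        have h5 : (pts.map PySem.Str.lower).any (fun pt => PySem.Str.isIn "case report" pt) = false := hF 5 (by omega)
        have h6 : (pts.map PySem.Str.lower).any (fun pt => PySem.Str.isIn "editorial" pt) = false := hF 6 (by omega)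
        have hk : (pts.map PySem.Str.lower).any (fun pt => PySem.Str.isIn "letter" pt) = true := hT
        have hSr := hS (by omega)
        simp only [h0, h1, h2, h3, h4, h5, h6, hk, hSr, Bool.false_eq_true, Bool.or_true, Bool.true_or, Bool.false_or, Bool.or_self, if_false, if_true]
        rfl
      · -- M = 8
        have h0 : (pts.map PySem.Str.lower).any (fun pt => PySem.Str.isIn "meta-analysis" pt) = false := hF 0 (by omega)
        have h1 : (pts.map PySem.Str.lower).any (fun pt => PySem.Str.isIn "systematic review" pt) = false := hF 1 (by omega)
        have h2 : (pts.map PySem.Str.lower).any (fun pt => PySem.Str.isIn "review" pt) = false := hF 2 (by omega)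
        have h3 : (pts.map PySem.Str.lower).any (fun pt => PySem.Str.isIn "randomized controlled trial" pt) = false := hF 3 (by omega)
        have h4 : (pts.map PySem.Str.lower).any (fun pt => PySem.Str.isIn "clinical trial" pt) = false := hF 4 (by omega)
        have h5 : (pts.map PySem.Str.lower).any (fun pt => PySem.Str.isIn "case report" pt) = false := hF 5 (by omega)
        have h6 : (pts.map PySem.Str.lower).any (fun pt => PySem.Str.isIn "editorial" pt) = false := hF 6 (by omega)
        have h7 : (pts.map PySem.Str.lower).any (fun pt => PySem.Str.isIn "letter" pt) = false := hF 7 (by omega)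
        have hk : (pts.map PySem.Str.lower).any (fun pt => PySem.Str.isIn "comment" pt) = true := hT
        have hSr := hS (by omega)
        simp only [h0, h1, h2, h3, h4, h5, h6, h7, hk, hSr, Bool.false_eq_true, Bool.or_true, Bool.true_or, Bool.false_or, Bool.or_self, if_false, if_true]
        rfl
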